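-- pv_equiv track=rewrite | github.com/Real-Fruit-Snacks/mainsail | mainsail/applets/getopt.py | _parse_short
-- ===== SOURCE A (Python) =====
-- def _parse_short(spec: str) -> dict[str, str]:
--     out: dict[str, str] = {}
--     i = 0
--     while i < len(spec):
--         ch = spec[i]
--         if ch == ":":
--             i += 1
--             continue
--         kind = "none"
--         if i + 1 < len(spec) and spec[i + 1] == ":":
--             if i + 2 < len(spec) and spec[i + 2] == ":":
--                 kind = "optional"
--                 i += 3
--             else:
--                 kind = "required"
--                 i += 2
--         else:
--             i += 1
--         out[ch] = kind
--     return out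
-- ===== SOURCE B (Python) =====
-- def _parse_short(spec: str) -> dict[str, str]:
--     kinds = ("none", "required", "optional")
--     pairs = []
--     run = 0  # colons seen so far to the right of the current position
--     for ch in reversed(spec):
--         if ch == ":":
--             run += 1
--         else:
--             pairs.append((ch, kinds[min(run, 2)]))
--             run = 0
--     return dict(reversed(pairs))
-- ===== Notes on version B (the rewrite author's own statement) =====
-- stated objective: alternative
-- what changed: A's forward index-jumping while loop with lookahead (i advances by 1/2/3 consuming colons) is replaced by a single backwards scan that counts the colon run to the right of each option character (kind = kinds[min(run,2)]), collects (char,kind) pairs in reverse and builds the dict from the re-reversed pair list.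
import Mathlib
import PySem

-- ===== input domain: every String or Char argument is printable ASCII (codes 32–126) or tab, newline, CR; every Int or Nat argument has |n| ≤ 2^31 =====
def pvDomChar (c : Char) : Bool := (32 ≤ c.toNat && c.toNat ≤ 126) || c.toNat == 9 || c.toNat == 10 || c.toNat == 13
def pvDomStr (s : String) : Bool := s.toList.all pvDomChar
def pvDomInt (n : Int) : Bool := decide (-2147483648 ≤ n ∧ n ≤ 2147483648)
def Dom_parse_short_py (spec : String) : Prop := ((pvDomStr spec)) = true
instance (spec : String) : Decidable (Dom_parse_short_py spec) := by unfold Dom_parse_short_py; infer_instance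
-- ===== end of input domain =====

-- B replaces A's forward index-jumping lookahead loop by a backwards scan with a colon-run counter (alternative decomposition; no speed claim).

-- ===== PORT A =====
-- A's while loop: i advances by 1, 2 or 3; out[ch] assigned per branch.
def parseShortLoopA (s : List Char) (out : PySem.Dict String String) (i : Nat) :
    PySem.Dict String String :=
  if i < s.length then
    let ch := s.getD i ' '
    if ch = ':' then parseShortLoopA s out (i + 1)
    else if i + 1 < s.length ∧ s.getD (i + 1) ' ' = ':' then
      if i + 2 < s.length ∧ s.getD (i + 2) ' ' = ':' then
        parseShortLoopA s (out.insert (String.ofList [ch]) "optional") (i + 3)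
      else
        parseShortLoopA s (out.insert (String.ofList [ch]) "required") (i + 2)
    else
      parseShortLoopA s (out.insert (String.ofList [ch]) "none") (i + 1)
  else out
termination_by s.length - i

def parse_short_py (spec : String) : List (String × String) :=
  (parseShortLoopA spec.toList PySem.Dict.empty 0).items

-- ===== PORT B =====
-- kinds = ("none", "required", "optional")
def pvKindsB : List String := ["none", "required", "optional"]

-- one step of the backwards scan: on ':' bump the run counter, else emit (ch, kinds[min(run,2)]) and reset
def pvStepRevB (st : Nat × List (String × String)) (c : Char) : Nat × List (String × String) :=
  if c = ':' then (st.1 + 1, st.2)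
  else (0, st.2 ++ [(String.ofList [c], pvKindsB.getD (min st.1 2) "")])

def parse_short_py_alt (spec : String) : List (String × String) :=
  let st := spec.toList.reverse.foldl pvStepRevB (0, [])
  (st.2.reverse.foldl (fun d p => d.insert p.1 p.2) (PySem.Dict.empty : PySem.Dict String String)).items

-- ===== PRECONDITION & SPEC =====
def Spec_parse_short_py (spec : String) (out : List (String × String)) : Prop := out = parse_short_py_alt spec
instance (spec : String) (out : List (String × String)) : Decidable (Spec_parse_short_py spec out) := by unfold Spec_parse_short_py; infer_instance

-- ===== CLAIM (what is proved, stated in full; the proofs are below) =====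
def Claim_equal_parse_short_py : Prop := ∀ (spec : String), Dom_parse_short_py spec → Spec_parse_short_py spec (parse_short_py spec)

-- ===== LEMMAS AND PROOFS =====

-- proof-only bridge: the forward (char, kind) pair list both programs realise
def pvFwd : List Char → List (String × String)
  | [] => []
  | [c] => if c = ':' then [] else [(String.ofList [c], "none")]
  | c :: d :: t =>
    if c = ':' then pvFwd (d :: t)
    else if d = ':' then
      match t with
      | [] => [(String.ofList [c], "required")]
      | e :: t' =>
        if e = ':' then (String.ofList [c], "optional") :: pvFwd t'
        else (String.ofList [c], "required") :: pvFwd (e :: t')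
    else (String.ofList [c], "none") :: pvFwd (d :: t)

-- number of leading colons
def pvLead : List Char → Nat
  | [] => 0
  | c :: t => if c = ':' then pvLead t + 1 else 0

lemma pvFwd_colon (t : List Char) : pvFwd (':' :: t) = pvFwd t := by
  cases t with
  | nil => rfl
  | cons d t => rw [pvFwd.eq_def]; simp

lemma pvFwd_none (c d : Char) (t : List Char) (hc : c ≠ ':') (hd : d ≠ ':') :
    pvFwd (c :: d :: t) = (String.ofList [c], "none") :: pvFwd (d :: t) := by
  rw [pvFwd.eq_def]; simp [hc, hd]

lemma pvFwd_single (c : Char) (hc : c ≠ ':') :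
    pvFwd [c] = (String.ofList [c], "none") :: pvFwd [] := by
  rw [pvFwd.eq_def]; simp [hc, pvFwd]

lemma pvFwd_req_end (c : Char) (hc : c ≠ ':') :
    pvFwd [c, ':'] = (String.ofList [c], "required") :: pvFwd [] := by
  rw [pvFwd.eq_def]; simp [hc, pvFwd]

lemma pvFwd_req (c e : Char) (t : List Char) (hc : c ≠ ':') (he : e ≠ ':') :
    pvFwd (c :: ':' :: e :: t) = (String.ofList [c], "required") :: pvFwd (e :: t) := by
  rw [pvFwd.eq_def]; simp [hc, he]

lemma pvFwd_opt (c : Char) (t : List Char) (hc : c ≠ ':') :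
    pvFwd (c :: ':' :: ':' :: t) = (String.ofList [c], "optional") :: pvFwd t := by
  rw [pvFwd.eq_def]; simp [hc]

lemma pvFwd_cons (c : Char) (t : List Char) (hc : c ≠ ':') :
    pvFwd (c :: t) =
      (String.ofList [c], pvKindsB.getD (min (pvLead t) 2) "") :: pvFwd t := by
  cases t with
  | nil =>
    rw [pvFwd_single c hc]
    simp [pvLead, pvKindsB]
  | cons d t =>
    by_cases hd : d = ':'
    · subst hd
      cases t with
      | nil =>
        rw [pvFwd_req_end c hc, pvFwd_colon]
        simp [pvLead, pvKindsB]
      | cons e t' =>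
        by_cases he : e = ':'
        · subst he
          rw [pvFwd_opt c t' hc, pvFwd_colon, pvFwd_colon]
          have hm : min (pvLead (':' :: ':' :: t')) 2 = 2 := by
            simp [pvLead]
          rw [hm]
          simp [pvKindsB]
        · rw [pvFwd_req c e t' hc he, pvFwd_colon]
          have hm : min (pvLead (':' :: e :: t')) 2 = 1 := by
            simp [pvLead, he]
          rw [hm]
          simp [pvKindsB]
    · rw [pvFwd_none c d t hc hd]
      have hm : min (pvLead (d :: t)) 2 = 0 := by
        simp [pvLead, hd]
      rw [hm]
      simp [pvKindsB]

-- B's backwards scan computes (pvLead s, (pvFwd s).reverse)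
lemma scanB_eq (s : List Char) :
    s.reverse.foldl pvStepRevB (0, []) = (pvLead s, (pvFwd s).reverse) := by
  rw [List.foldl_reverse]
  induction s with
  | nil => simp [pvFwd, pvLead]
  | cons c t ih =>
    rw [List.foldr_cons, ih]
    by_cases hc : c = ':'
    · subst hc
      simp [pvStepRevB, pvLead, pvFwd_colon]
    · rw [pvFwd_cons c t hc]
      simp [pvStepRevB, hc, pvLead]

-- A's loop folds the insert step over pvFwd of the remaining suffix
lemma loopA_eq (s : List Char) :
    ∀ n i out, s.length - i ≤ n →
      parseShortLoopA s out i =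
        (pvFwd (s.drop i)).foldl (fun d p => d.insert p.1 p.2) out := by
  intro n
  induction n with
  | zero =>
    intro i out h
    rw [parseShortLoopA, List.drop_eq_nil_of_le (by omega)]
    simp [pvFwd, Nat.not_lt.mpr (show s.length ≤ i by omega)]
  | succ n ih =>
    intro i out h
    by_cases hi : i < s.length
    · have hdrop : s.drop i = s.getD i ' ' :: s.drop (i + 1) := by
        rw [List.drop_eq_getElem_cons hi, List.getD_eq_getElem s ' ' hi]
      rw [parseShortLoopA, if_pos hi, hdrop]
      by_cases hc : s.getD i ' ' = ':'
      · rw [if_pos hc, hc, pvFwd_colon]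
        exact ih (i + 1) out (by omega)
      · rw [if_neg hc]
        by_cases h1 : i + 1 < s.length ∧ s.getD (i + 1) ' ' = ':'
        · have hd1 : s.drop (i + 1) = ':' :: s.drop (i + 2) := by
            rw [List.drop_eq_getElem_cons h1.1, ← List.getD_eq_getElem s ' ' h1.1, h1.2]
          by_cases h2 : i + 2 < s.length ∧ s.getD (i + 2) ' ' = ':'
          · have hd2 : s.drop (i + 2) = ':' :: s.drop (i + 3) := by
              rw [List.drop_eq_getElem_cons h2.1, ← List.getD_eq_getElem s ' ' h2.1, h2.2]
            rw [if_pos h1, if_pos h2, hd1, hd2,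
                pvFwd_opt _ _ hc, List.foldl_cons]
            exact ih (i + 3) _ (by omega)
          · have hd2 : pvFwd (s.getD i ' ' :: ':' :: s.drop (i + 2)) =
                (String.ofList [s.getD i ' '], "required") :: pvFwd (s.drop (i + 2)) := by
              rcases Nat.lt_or_ge (i + 2) s.length with hlt | hge
              · have hne : s.getD (i + 2) ' ' ≠ ':' := fun hx => h2 ⟨hlt, hx⟩
                rw [List.drop_eq_getElem_cons hlt, ← List.getD_eq_getElem s ' ' hlt]
                exact pvFwd_req _ _ _ hc hne
              · rw [List.drop_eq_nil_of_le hge]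
                exact pvFwd_req_end _ hc
            rw [if_pos h1, if_neg h2, hd1, hd2, List.foldl_cons]
            exact ih (i + 2) _ (by omega)
        · have hd1 : pvFwd (s.getD i ' ' :: s.drop (i + 1)) =
              (String.ofList [s.getD i ' '], "none") :: pvFwd (s.drop (i + 1)) := by
            rcases Nat.lt_or_ge (i + 1) s.length with hlt | hge
            · have hne : s.getD (i + 1) ' ' ≠ ':' := fun hx => h1 ⟨hlt, hx⟩
              rw [List.drop_eq_getElem_cons hlt, ← List.getD_eq_getElem s ' ' hlt]
              exact pvFwd_none _ _ _ hc hne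
            · rw [List.drop_eq_nil_of_le hge]
              exact pvFwd_single _ hc
          rw [if_neg h1, hd1, List.foldl_cons]
          exact ih (i + 1) _ (by omega)
    · rw [parseShortLoopA, if_neg hi, List.drop_eq_nil_of_le (by omega)]
      simp [pvFwd]

-- ===== VERDICT (by name: the statement is the Claim_ definition above) =====
theorem parse_short_py_spec : Claim_equal_parse_short_py := by
  intro spec _
  unfold Spec_parse_short_py parse_short_py parse_short_py_alt
  rw [loopA_eq spec.toList spec.toList.length 0 PySem.Dict.empty (by omega),
      scanB_eq spec.toList]
  simp
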